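-- pv_equiv track=rewrite | github.com/BoyangGu1/MIMIC-Admission-Summary | rewrite_model_based_inference.py | is_valid_cuda_visible_devices
-- ===== SOURCE A (Python) =====
-- def is_valid_cuda_visible_devices(cuda_str: str) -> bool:
--     if cuda_str == "":
--         return True  # An empty string is a valid value
--
--     devices = cuda_str.split(',')
--
--     try:
--         # Convert to integers and check for duplicates
--         device_numbers = list(map(int, devices))
--     except ValueError:
--         return False  # Non-integer value present
--
--     # Check for non-negative integers and duplicates
--     if any(d < 0 for d in device_numbers) or len(device_numbers) != len(set(device_numbers)):
--         return False
--
--     return True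
-- ===== SOURCE B (Python) =====
-- def is_valid_cuda_visible_devices(cuda_str: str) -> bool:
--     if cuda_str == "":
--         return True
--     try:
--         nums = sorted(int(tok) for tok in cuda_str.split(','))
--     except ValueError:
--         return False  # Non-integer value present
--     # sorted order: smallest element first, duplicates adjacent
--     if nums[0] < 0:
--         return False
--     return all(a < b for a, b in zip(nums, nums[1:]))
-- ===== Notes on version B (the rewrite author's own statement) =====
-- stated objective: alternative
-- what changed: B sorts the parsed device numbers and validates by order: the minimum (first sorted element) must be non-negative and every adjacent sorted pair strictly increasing, replacing A's any-scan for negatives and set-based duplicate detection.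
import Mathlib
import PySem

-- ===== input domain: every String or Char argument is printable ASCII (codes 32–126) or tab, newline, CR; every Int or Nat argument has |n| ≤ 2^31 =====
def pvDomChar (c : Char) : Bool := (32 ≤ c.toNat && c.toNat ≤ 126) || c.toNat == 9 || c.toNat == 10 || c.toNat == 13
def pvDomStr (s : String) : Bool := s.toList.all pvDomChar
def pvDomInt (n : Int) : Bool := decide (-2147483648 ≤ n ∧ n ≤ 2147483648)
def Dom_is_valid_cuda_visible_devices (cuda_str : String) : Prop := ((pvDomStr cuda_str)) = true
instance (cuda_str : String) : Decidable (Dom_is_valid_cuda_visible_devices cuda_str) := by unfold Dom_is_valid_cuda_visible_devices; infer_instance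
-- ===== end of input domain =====

-- B validates by sorting: the minimum (first sorted element) must be non-negative and
-- adjacent sorted pairs strictly increasing, replacing A's any-scan and set-length duplicate check.

-- ===== PORT A =====
def is_valid_cuda_visible_devices (cuda_str : String) : Bool :=
  if cuda_str == "" then true
  else
    let devices := PySem.Chars.splitOn cuda_str.toList ",".toList
    match devices.mapM PySem.Int.ofChars? with
    | none => false                      -- ValueError: non-integer token
    | some device_numbers =>
      if device_numbers.any (fun d => d < 0)
          || device_numbers.length ≠ (PySem.Set.ofList device_numbers).length then false
      else true

-- ===== PORT B =====
def is_valid_cuda_visible_devices_alt (cuda_str : String) : Bool :=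
  if cuda_str == "" then true
  else
    match (PySem.Chars.splitOn cuda_str.toList ",".toList).mapM PySem.Int.ofChars? with
    | none => false                      -- ValueError: non-integer token
    | some parsed =>
      let nums := PySem.List.sorted parsed (fun x => x) false
      match nums with
      | [] => true       -- unreachable: split(',') always yields at least one token, so nums ≠ []
      | n0 :: _ =>
        if n0 < 0 then false             -- nums[0] < 0
        else (nums.zip nums.tail).all (fun p => p.1 < p.2)

-- ===== PRECONDITION & SPEC =====
def Spec_is_valid_cuda_visible_devices (cuda_str : String) (out : Bool) : Prop := out = is_valid_cuda_visible_devices_alt cuda_str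
instance (cuda_str : String) (out : Bool) : Decidable (Spec_is_valid_cuda_visible_devices cuda_str out) := by unfold Spec_is_valid_cuda_visible_devices; infer_instance

-- ===== CLAIM (what is proved, stated in full; the proofs are below) =====
def Claim_equal_is_valid_cuda_visible_devices : Prop := ∀ (cuda_str : String), Dom_is_valid_cuda_visible_devices cuda_str → Spec_is_valid_cuda_visible_devices cuda_str (is_valid_cuda_visible_devices cuda_str)

-- ===== LEMMAS AND PROOFS =====

-- set(xs) keeps a subsequence of xs, so it has xs's length exactly when xs has no duplicates
theorem ofList_sublist (ns : List Int) : (PySem.Set.ofList ns).Sublist ns := by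
  induction ns with
  | nil => simp [PySem.Set.ofList]
  | cons x xs ih =>
    rw [PySem.Set.ofList_cons]
    refine List.Sublist.cons₂ x (List.Sublist.trans ?_ ih)
    simp only [PySem.Set.discard]
    exact List.filter_sublist

theorem ofList_length_eq_iff (ns : List Int) :
    (PySem.Set.ofList ns).length = ns.length ↔ ns.Nodup := by
  constructor
  · intro h
    have := (ofList_sublist ns).eq_of_length h
    rw [← this]
    exact PySem.Set.nodup_ofList ns
  · intro h
    rw [PySem.Set.ofList_eq_self_of_nodup ns h]

-- on a ≤-sorted list, strictness of every adjacent pair is exactly Nodup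
theorem adj_all_iff_nodup (ns : List Int) (hs : ns.Pairwise (· ≤ ·)) :
    ((ns.zip ns.tail).all (fun p => p.1 < p.2)) = true ↔ ns.Nodup := by
  induction ns with
  | nil => simp
  | cons x t ih =>
    cases t with
    | nil => simp
    | cons y u =>
      have hx : ∀ z ∈ y :: u, x ≤ z := fun z hz => (List.pairwise_cons.mp hs).1 z hz
      have hyu : ∀ z ∈ u, y ≤ z := fun z hz =>
        (List.pairwise_cons.mp (List.pairwise_cons.mp hs).2).1 z hz
      have ih' := ih (List.pairwise_cons.mp hs).2
      simp only [List.tail_cons, List.zip_cons_cons, List.all_cons, Bool.and_eq_true,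
        decide_eq_true_eq, List.nodup_cons] at ih' ⊢
      constructor
      · rintro ⟨hxy, hrest⟩
        refine ⟨?_, ih'.mp hrest⟩
        intro hmem
        rcases List.mem_cons.mp hmem with h | h
        · omega
        · have := hyu x h; omega
      · rintro ⟨hnot, hnd⟩
        refine ⟨?_, ih'.mpr hnd⟩
        have hne : x ≠ y := fun he => hnot (by simp [he])
        have := hx y (by simp)
        omega

-- ===== VERDICT (by name: the statement is the Claim_ definition above) =====
theorem is_valid_cuda_visible_devices_spec : Claim_equal_is_valid_cuda_visible_devices := by
  intro s _
  unfold Spec_is_valid_cuda_visible_devices is_valid_cuda_visible_devices is_valid_cuda_visible_devices_alt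
  split
  · rfl
  · simp only [show (",".toList : List Char) = [','] from rfl]
    cases h : (PySem.Chars.splitOn s.toList [',']).mapM PySem.Int.ofChars? with
    | none => simp
    | some ns =>
      dsimp only
      cases hsrt : PySem.List.sorted ns (fun x => x) false with
      | nil =>
        have hnil : ns = [] := (PySem.List.sorted_eq_nil_iff _ _ _).mp hsrt
        subst hnil
        simp [PySem.Set.ofList]
      | cons n0 t =>
        have hperm : (n0 :: t).Perm ns := hsrt ▸ PySem.List.sorted_perm ns (fun x => x) false
        have hpw : (n0 :: t).Pairwise (fun a b => a ≤ b) := by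
          have := PySem.List.sorted_pairwise ns (fun x => x)
          rwa [hsrt] at this
        have hmin : ∀ y ∈ ns, n0 ≤ y := PySem.List.key_head_sorted_le ns (fun x => x) hsrt
        have hmem : n0 ∈ ns := hperm.mem_iff.mp (by simp)
        -- A's negativity test equals B's head test
        have hany : ns.any (fun d => decide (d < 0)) = decide (n0 < 0) := by
          rw [Bool.eq_iff_iff]
          simp only [List.any_eq_true, decide_eq_true_eq]
          exact ⟨fun ⟨y, hy, hlt⟩ => lt_of_le_of_lt (hmin y hy) hlt,
                 fun hlt => ⟨n0, hmem, hlt⟩⟩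
        -- A's set-length test equals B's adjacent-pair scan
        have hdup : (((n0 :: t).zip t).all (fun p => p.1 < p.2)) = true ↔ ns.Nodup := by
          rw [show ((n0 :: t).zip t) = ((n0 :: t).zip (n0 :: t).tail) from rfl]
          rw [adj_all_iff_nodup _ hpw]
          exact hperm.nodup_iff
        simp only [List.tail_cons]
        rw [hany]
        by_cases hn0 : n0 < 0
        · simp [hn0]
        · by_cases hnd : ns.Nodup
          · have hlen := (ofList_length_eq_iff ns).mpr hnd
            simp [hn0, hlen, hdup.mpr hnd]
          · have hlen : ns.length ≠ (PySem.Set.ofList ns).length :=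
              fun hc => hnd ((ofList_length_eq_iff ns).mp hc.symm)
            have hz : (((n0 :: t).zip t).all fun p => decide (p.1 < p.2)) = false := by
              rw [Bool.eq_false_iff]
              intro hc
              exact hnd (hdup.mp hc)
            simp [hn0, hlen, hz]
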